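-- pv_equiv track=rewrite | github.com/anupyadav27/threat-engine | catalog/gcp/temp_code/enhance_yaml_quality.py | get_produces_fields
-- ===== SOURCE A (Python) =====
-- from typing import Optional, Tuple, List
--
-- def get_produces_fields(operation: dict) -> Tuple[Optional[str], List[Tuple[str, str]]]:
--     """
--     Returns (output_path, item_fields) where:
--     - output_path: the response collection path (from source='output')
--     - item_fields: list of (path, path) for source='item' entries
--     """
--     produces = operation.get("produces", [])
--     output_path = None
--     item_fields = []
--
--     for p in produces:
--         source = p.get("source", "")
--         path = p.get("path", "")
--
--         if source == "output":
--             if output_path is None:  # Take the first output path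
--                 output_path = path
--         elif source == "item" and path:
--             item_fields.append(path)
--
--     return output_path, item_fields
-- ===== SOURCE B (Python) =====
-- def get_produces_fields(operation):
--     def go(ps):
--         if not ps:
--             return (None, [])
--         head, rest = ps[0], ps[1:]
--         out, items = go(rest)
--         source = head.get("source", "")
--         path = head.get("path", "")
--         if source == "output":
--             return (path, items)
--         if source == "item" and path:
--             return (out, [path] + items)
--         return (out, items)
--     return go(operation.get("produces", []))
-- ===== Notes on version B (the rewrite author's own statement) =====
-- stated objective: alternative
-- what changed: Replaces A's forward loop with mutable state (a None-guard for the first output, appends for items) by a structural recursion on the list: the tail's result is computed first and the head is combined in front, so the first output wins by overriding rather than by a guard.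
import Mathlib
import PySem

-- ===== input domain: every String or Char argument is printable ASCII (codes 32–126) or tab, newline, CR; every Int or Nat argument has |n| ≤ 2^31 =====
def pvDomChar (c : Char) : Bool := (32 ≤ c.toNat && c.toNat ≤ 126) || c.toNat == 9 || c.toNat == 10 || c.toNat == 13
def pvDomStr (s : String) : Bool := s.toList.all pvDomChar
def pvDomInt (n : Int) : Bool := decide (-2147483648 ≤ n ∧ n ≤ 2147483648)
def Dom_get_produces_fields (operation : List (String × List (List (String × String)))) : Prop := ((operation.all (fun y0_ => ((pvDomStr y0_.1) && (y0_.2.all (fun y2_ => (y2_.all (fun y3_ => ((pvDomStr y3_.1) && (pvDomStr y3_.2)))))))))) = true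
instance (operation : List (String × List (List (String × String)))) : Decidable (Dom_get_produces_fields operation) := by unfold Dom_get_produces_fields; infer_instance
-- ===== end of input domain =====

-- B replaces A's forward loop with mutable state by a structural recursion: the tail's
-- answer is combined with the head, so the first output wins by overriding (no None guard).

-- shared helper: Python's dict.get(k, dflt) on an association list (first match)
def pvGetD {α : Type} (d : List (String × α)) (k : String) (dflt : α) : α :=
  match d with
  | [] => dflt
  | (k', v) :: rest => if k' == k then v else pvGetD rest k dflt

-- ===== PORT A =====
def get_produces_fields (operation : List (String × List (List (String × String)))) : Option String × List String :=
  let produces := pvGetD operation "produces" []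
  let st := produces.foldl
    (fun (s : Option String × List String) p =>
      let source := pvGetD p "source" ""
      let path := pvGetD p "path" ""
      if source == "output" then
        (if s.1 = none then (some path, s.2) else s)
      else if source == "item" && path != "" then (s.1, s.2 ++ [path])
      else s)
    (none, [])
  (st.1, st.2)

-- ===== PORT B =====
-- Source B's inner recursive helper `go`
def pvGo : List (List (String × String)) → Option String × List String
  | [] => (none, [])
  | head :: rest =>
    let r := pvGo rest
    let source := pvGetD head "source" ""
    let path := pvGetD head "path" ""
    if source == "output" then (some path, r.2)
    else if source == "item" && path != "" then (r.1, path :: r.2)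
    else r

def get_produces_fields_alt (operation : List (String × List (List (String × String)))) : Option String × List String :=
  pvGo (pvGetD operation "produces" [])

-- ===== PRECONDITION & SPEC =====
def Spec_get_produces_fields (operation : List (String × List (List (String × String)))) (out : Option String × List String) : Prop := out = get_produces_fields_alt operation
instance (operation : List (String × List (List (String × String)))) (out : Option String × List String) : Decidable (Spec_get_produces_fields operation out) := by unfold Spec_get_produces_fields; infer_instance

-- ===== CLAIM (what is proved, stated in full; the proofs are below) =====
def Claim_equal_get_produces_fields : Prop := ∀ (operation : List (String × List (List (String × String)))), Dom_get_produces_fields operation → Spec_get_produces_fields operation (get_produces_fields operation)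

-- ===== LEMMAS AND PROOFS =====

-- A's loop, characterised against B's recursion: the fold from accumulator acc equals
-- (acc's output if set, else the recursion's output; acc's items followed by the recursion's).
theorem get_produces_fields_loop (l : List (List (String × String)))
    (acc : Option String × List String) :
    l.foldl
      (fun (s : Option String × List String) p =>
        let source := pvGetD p "source" ""
        let path := pvGetD p "path" ""
        if source == "output" then
          (if s.1 = none then (some path, s.2) else s)
        else if source == "item" && path != "" then (s.1, s.2 ++ [path])
        else s)
      acc
    = (match acc.1 with
       | some v => some v
       | none => (pvGo l).1,
       acc.2 ++ (pvGo l).2) := by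
  induction l generalizing acc with
  | nil => cases acc with | mk o i => cases o <;> simp [pvGo]
  | cons p rest ih =>
    cases acc with | mk o i =>
    rw [List.foldl_cons, ih]
    by_cases hout : (pvGetD p "source" "" == "output") = true
    · cases o <;> simp [pvGo, hout]
    · by_cases hitem : (pvGetD p "source" "" == "item" && pvGetD p "path" "" != "") = true
      · cases o <;> simp [pvGo, hout, hitem]
      · cases o <;> simp [pvGo, hout, hitem]

-- ===== VERDICT (by name: the statement is the Claim_ definition above) =====
theorem get_produces_fields_spec : Claim_equal_get_produces_fields := by
  intro operation _
  unfold Spec_get_produces_fields get_produces_fields get_produces_fields_alt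
  simp only [get_produces_fields_loop]
  simp
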